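-- pv_equiv track=rewrite | github.com/mgabor3141/dots | private_dot_local/bin/pr_status/discover.py | shorten_repo_name
-- ===== SOURCE A (Python) =====
-- MAX_REPO_NAME = 16
--
-- def shorten_repo_name(name: str) -> str:
--     """Shorten long repo names by abbreviating leading segments to initials.
--     e.g. example-backend-service -> e-b-service"""
--     if len(name) <= MAX_REPO_NAME:
--         return name
--     sep = "-" if "-" in name else "_" if "_" in name else None
--     if not sep:
--         return name[: MAX_REPO_NAME - 1] + "…"
--     parts = name.split(sep)
--     if len(parts) < 2:
--         return name[: MAX_REPO_NAME - 1] + "…"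
--     for i in range(len(parts) - 1):
--         parts[i] = parts[i][0] if parts[i] else parts[i]
--         if len(sep.join(parts)) <= MAX_REPO_NAME:
--             return sep.join(parts)
--     return sep.join(parts)
-- ===== SOURCE B (Python) =====
-- MAX_REPO_NAME = 16
--
-- def shorten_repo_name(name: str) -> str:
--     """Shorten long repo names by abbreviating leading segments to initials.
--
--     Instead of re-joining and re-measuring after every abbreviation, compute how
--     many leading parts k must be abbreviated from the per-part savings, then
--     build the result with a single join."""
--     if len(name) <= MAX_REPO_NAME:
--         return name
--     sep = "-" if "-" in name else "_" if "_" in name else None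
--     if sep is None:
--         return name[: MAX_REPO_NAME - 1] + "…"
--     parts = name.split(sep)
--     excess = len(name) - MAX_REPO_NAME
--     saved = 0
--     k = len(parts) - 1
--     for i, p in enumerate(parts[:-1]):
--         saved += max(len(p) - 1, 0)
--         if saved >= excess:
--             k = i + 1
--             break
--     return sep.join([p[:1] for p in parts[:k]] + parts[k:])
-- ===== Notes on version B (the rewrite author's own statement) =====
-- stated objective: alternative
-- what changed: B computes the number k of leading parts to abbreviate arithmetically from per-part savings (one scan over part lengths) and builds the result with a single join, instead of A's re-joining and re-measuring the whole parts list after every abbreviation.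
import Mathlib
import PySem

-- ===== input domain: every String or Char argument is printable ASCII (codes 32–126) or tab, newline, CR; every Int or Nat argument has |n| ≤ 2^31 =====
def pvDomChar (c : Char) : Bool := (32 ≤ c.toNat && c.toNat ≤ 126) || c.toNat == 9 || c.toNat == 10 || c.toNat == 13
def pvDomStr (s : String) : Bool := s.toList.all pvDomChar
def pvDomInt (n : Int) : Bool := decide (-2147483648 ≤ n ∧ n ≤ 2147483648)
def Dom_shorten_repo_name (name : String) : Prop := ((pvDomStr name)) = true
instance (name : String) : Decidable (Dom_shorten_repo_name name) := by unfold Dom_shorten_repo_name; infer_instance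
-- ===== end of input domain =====

-- B replaces A's per-iteration re-join-and-measure by computing the needed abbreviation
-- count k arithmetically from per-part savings and building the result with a single join.

-- ===== PORT A =====
-- parts[i] = parts[i][0] if parts[i] else parts[i]
def pvAbbrevA (p : List Char) : List Char :=
  match p with
  | [] => p
  | ch :: _ => [ch]

-- the 'for i in range(len(parts) - 1)' loop of A: acc = already-processed prefix
def pvLoopA (sep : List Char) (acc rest : List (List Char)) : List Char :=
  match rest with
  | [] => PySem.Chars.join sep acc
  | [p] => PySem.Chars.join sep (acc ++ [p])
  | p :: q :: rest' =>
    let acc' := acc ++ [pvAbbrevA p]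
    if PySem.Chars.len (PySem.Chars.join sep (acc' ++ q :: rest')) ≤ 16 then
      PySem.Chars.join sep (acc' ++ q :: rest')
    else pvLoopA sep acc' (q :: rest')

def shorten_repo_name (name : String) : String :=
  let cs := name.toList
  if PySem.Chars.len cs ≤ 16 then name
  else
    let sep? : Option Char :=
      if PySem.Chars.isIn ['-'] cs then some '-'
      else if PySem.Chars.isIn ['_'] cs then some '_'
      else none
    match sep? with
    | none => String.ofList (PySem.Chars.slice cs none (some 15) ++ ['…'])
    | some c =>
      let parts := PySem.Chars.splitOn cs [c]
      if parts.length < 2 then String.ofList (PySem.Chars.slice cs none (some 15) ++ ['…'])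
      else String.ofList (pvLoopA [c] [] parts)

-- ===== PORT B =====
-- the 'for i, p in enumerate(parts[:-1])' scan of B: returns the abbreviation count k
def pvScanB (excess : Int) : List (List Char) → Int → Nat → Nat → Nat
  | [], _, _, dflt => dflt
  | p :: ps, saved, i, dflt =>
    let saved' := saved + max (PySem.Chars.len p - 1) 0
    if excess ≤ saved' then i + 1 else pvScanB excess ps saved' (i + 1) dflt

def shorten_repo_name_alt (name : String) : String :=
  let cs := name.toList
  if PySem.Chars.len cs ≤ 16 then name
  else
    let sep? : Option Char :=
      if PySem.Chars.isIn ['-'] cs then some '-'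
      else if PySem.Chars.isIn ['_'] cs then some '_'
      else none
    match sep? with
    | none => String.ofList (PySem.Chars.slice cs none (some 15) ++ ['…'])
    | some c =>
      let parts := PySem.Chars.splitOn cs [c]
      let k := pvScanB (PySem.Chars.len cs - 16) parts.dropLast 0 0 (parts.length - 1)
      String.ofList (PySem.Chars.join [c]
        ((parts.take k).map (fun p => PySem.Chars.slice p none (some 1)) ++ parts.drop k))

-- ===== PRECONDITION & SPEC =====
def Spec_shorten_repo_name (name : String) (out : String) : Prop := out = shorten_repo_name_alt name
instance (name : String) (out : String) : Decidable (Spec_shorten_repo_name name out) := by unfold Spec_shorten_repo_name; infer_instance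

-- ===== CLAIM (what is proved, stated in full; the proofs are below) =====
def Claim_equal_shorten_repo_name : Prop := ∀ (name : String), Dom_shorten_repo_name name → Spec_shorten_repo_name name (shorten_repo_name name)

-- ===== LEMMAS AND PROOFS =====


def pvSplit (c : Char) : List Char → List (List Char)
  | [] => [[]]
  | x :: xs =>
    if x = c then [] :: pvSplit c xs
    else
      match pvSplit c xs with
      | [] => [[x]]
      | h :: t => (x :: h) :: t

theorem pvSplit_ne_nil (c : Char) (l : List Char) : pvSplit c l ≠ [] := by
  cases l with
  | nil => simp [pvSplit]
  | cons x xs =>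
    simp only [pvSplit]
    split
    · simp
    · split <;> simp

theorem pvGo_eq (c : Char) : ∀ (fuel : Nat) (l cur : List Char) (acc : List (List Char)),
    l.length < fuel →
    PySem.Chars.splitOn.go [c] fuel l cur acc =
      acc.reverse ++ (match pvSplit c l with
        | [] => []
        | h :: t => (cur.reverse ++ h) :: t) := by
  intro fuel
  induction fuel with
  | zero => intro l cur acc h; omega
  | succ n ih =>
    intro l cur acc h
    cases l with
    | nil =>
      rw [PySem.Chars.splitOn.go]
      simp [pvSplit]
      omega
    | cons x xs =>
      rw [PySem.Chars.splitOn.go]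
      by_cases hx : x = c
      · have hpre : [c].isPrefixOf (x :: xs) = true := by simp [List.isPrefixOf, hx]
        simp only [hpre, if_pos]
        rw [ih]
        · subst hx
          simp only [pvSplit]
          cases hms : pvSplit x xs with
          | nil => exact absurd hms (pvSplit_ne_nil x xs)
          | cons h t => simp [hms]
        · simp at h ⊢; omega
      · have hpre : [c].isPrefixOf (x :: xs) = false := by
          simp [List.isPrefixOf]; exact fun hc => absurd hc.symm hx
        simp only [hpre]
        rw [if_neg (by simp)]
        rw [ih]
        · simp only [pvSplit, if_neg hx]
          cases hms : pvSplit c xs with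
          | nil => exact absurd hms (pvSplit_ne_nil c xs)
          | cons hh tt => simp
        · simp at h ⊢; omega

theorem pvSplitOn_eq (c : Char) (cs : List Char) :
    PySem.Chars.splitOn cs [c] = pvSplit c cs := by
  rw [PySem.Chars.splitOn, pvGo_eq c (cs.length + 1) cs [] [] (by omega)]
  cases hms : pvSplit c cs with
  | nil => exact absurd hms (pvSplit_ne_nil c cs)
  | cons h t => simp

theorem pvJoin_pvSplit (c : Char) (l : List Char) :
    PySem.Chars.join [c] (pvSplit c l) = l := by
  induction l with
  | nil => simp [pvSplit, PySem.Chars.join_singleton]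
  | cons x xs ih =>
    simp only [pvSplit]
    by_cases hx : x = c
    · rw [if_pos hx]
      cases hms : pvSplit c xs with
      | nil => exact absurd hms (pvSplit_ne_nil c xs)
      | cons h t =>
        rw [PySem.Chars.join_cons_cons]
        rw [hms] at ih
        simp [ih, hx]
    · rw [if_neg hx]
      cases hms : pvSplit c xs with
      | nil => exact absurd hms (pvSplit_ne_nil c xs)
      | cons h t =>
        rw [hms] at ih
        cases t with
        | nil =>
          rw [PySem.Chars.join_singleton]
          rw [PySem.Chars.join_singleton] at ih
          simp [ih]
        | cons q t' =>
          rw [PySem.Chars.join_cons_cons]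
          rw [PySem.Chars.join_cons_cons] at ih
          simp [← ih]

theorem pvSplit_len_ge_two (c : Char) (l : List Char) (h : c ∈ l) :
    2 ≤ (pvSplit c l).length := by
  induction l with
  | nil => simp at h
  | cons x xs ih =>
    simp only [pvSplit]
    by_cases hx : x = c
    · rw [if_pos hx]
      have := pvSplit_ne_nil c xs
      cases hms : pvSplit c xs with
      | nil => exact absurd hms this
      | cons a b => simp
    · rw [if_neg hx]
      have hm : c ∈ xs := by
        rcases List.mem_cons.mp h with h1 | h2
        · exact absurd h1.symm hx
        · exact h2
      cases hms : pvSplit c xs with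
      | nil => exact absurd hms (pvSplit_ne_nil c xs)
      | cons a b =>
        have := ih hm
        rw [hms] at this
        simpa using this

def pvJ (ps : List (List Char)) : Int := (ps.map (fun p => PySem.Chars.len p + 1)).sum - 1

theorem pvLen_join (c : Char) (ps : List (List Char)) (h : ps ≠ []) :
    PySem.Chars.len (PySem.Chars.join [c] ps) = pvJ ps := by
  induction ps with
  | nil => simp at h
  | cons p t ih =>
    cases t with
    | nil => simp [PySem.Chars.join_singleton, pvJ]
    | cons q t' =>
      rw [PySem.Chars.join_cons_cons]
      have ih' := ih (by simp)
      have hsum : pvJ (p :: q :: t') = PySem.Chars.len p + 1 + pvJ (q :: t') := by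
        simp only [pvJ, List.map_cons, List.sum_cons]
        omega
      rw [hsum, ← ih']
      simp only [PySem.Chars.len, List.length_append, List.length_cons]
      push_cast
      simp

def pvSave (pre : List (List Char)) : Int :=
  (pre.map (fun p => max (PySem.Chars.len p - 1) 0)).sum

theorem pvLen_abbrev (p : List Char) :
    PySem.Chars.len (pvAbbrevA p) = PySem.Chars.len p - max (PySem.Chars.len p - 1) 0 := by
  cases p with
  | nil => simp [pvAbbrevA, PySem.Chars.len]
  | cons x xs =>
    simp [pvAbbrevA, PySem.Chars.len]

theorem pvJ_abbrev (pre rest : List (List Char)) :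
    pvJ (pre.map pvAbbrevA ++ rest) = pvJ (pre ++ rest) - pvSave pre := by
  induction pre with
  | nil => simp [pvSave]
  | cons p t ih =>
    simp only [List.map_cons, List.cons_append, pvJ, List.sum_cons, pvSave] at ih ⊢
    rw [pvLen_abbrev]
    omega

theorem pvMain (c : Char) (excess : Int) :
    ∀ (rest pre : List (List Char)), rest ≠ [] →
    excess = pvJ (pre ++ rest) - 16 →
    pvLoopA [c] (pre.map pvAbbrevA) rest =
      PySem.Chars.join [c]
        ((((pre ++ rest).take (pvScanB excess rest.dropLast (pvSave pre) pre.length ((pre ++ rest).length - 1))).map pvAbbrevA)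
          ++ (pre ++ rest).drop (pvScanB excess rest.dropLast (pvSave pre) pre.length ((pre ++ rest).length - 1))) := by
  intro rest
  induction rest with
  | nil => intro pre h; exact absurd rfl h
  | cons p rest' ih =>
    intro pre _ hex
    cases rest' with
    | nil =>
      simp only [pvLoopA]
      rw [show ([p] : List (List Char)).dropLast = [] from rfl]
      simp only [pvScanB]
      rw [show (pre ++ [p]).length - 1 = pre.length by simp]
      rw [List.take_left, List.drop_left]
    | cons q t =>
      have hacc : pre.map pvAbbrevA ++ [pvAbbrevA p] = (pre ++ [p]).map pvAbbrevA := by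
        simp
      have hjoin : PySem.Chars.len (PySem.Chars.join [c] ((pre ++ [p]).map pvAbbrevA ++ (q :: t)))
          = pvJ (pre ++ p :: q :: t) - (pvSave pre + max (PySem.Chars.len p - 1) 0) := by
        rw [pvLen_join c _ (by simp), pvJ_abbrev]
        have h1 : pvSave (pre ++ [p]) = pvSave pre + max (PySem.Chars.len p - 1) 0 := by
          simp [pvSave]
        have h2 : (pre ++ [p]) ++ q :: t = pre ++ p :: q :: t := by simp
        rw [h1, h2]
      have hdl : (p :: q :: t).dropLast = p :: (q :: t).dropLast := by
        exact List.dropLast_cons₂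
      simp only [pvLoopA, hacc, pvScanB, hdl]
      by_cases hcond : excess ≤ pvSave pre + max (PySem.Chars.len p - 1) 0
      · rw [if_pos (by rw [hjoin]; omega), if_pos hcond]
        have htake : (pre ++ p :: q :: t).take (pre.length + 1) = pre ++ [p] := by
          rw [show pre ++ p :: q :: t = (pre ++ [p]) ++ q :: t by simp]
          exact List.take_left' (by simp)
        have hdrop : (pre ++ p :: q :: t).drop (pre.length + 1) = q :: t := by
          rw [show pre ++ p :: q :: t = (pre ++ [p]) ++ q :: t by simp]
          exact List.drop_left' (by simp)
        rw [htake, hdrop]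
      · rw [if_neg (by rw [hjoin]; omega), if_neg hcond]
        have := ih (pre ++ [p]) (by simp) (by rw [show (pre ++ [p]) ++ q :: t = pre ++ p :: q :: t by simp]; exact hex)
        rw [show pvSave pre + max (PySem.Chars.len p - 1) 0 = pvSave (pre ++ [p]) by simp [pvSave]]
        rw [show pre.length + 1 = (pre ++ [p]).length by simp]
        rw [show pre ++ p :: q :: t = (pre ++ [p]) ++ q :: t by simp]
        exact this

theorem pvSlice_eq_abbrev : (fun p => PySem.Chars.slice p none (some 1)) = pvAbbrevA := by
  funext p
  rw [PySem.Chars.slice_eq_listSlice, PySem.List.slice_to p (by norm_num)]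
  cases p <;> rfl

theorem pvMem_of_isIn (a : Char) (cs : List Char) (h : PySem.Chars.isIn [a] cs = true) : a ∈ cs := by
  rw [PySem.Chars.isIn_iff_infix] at h
  exact h.sublist.subset (List.mem_singleton_self a)

theorem pvBody (cs : List Char) (c : Char) (hmem : c ∈ cs) :
    (if (PySem.Chars.splitOn cs [c]).length < 2 then
       String.ofList (PySem.Chars.slice cs none (some 15) ++ ['…'])
     else String.ofList (pvLoopA [c] [] (PySem.Chars.splitOn cs [c])))
    = String.ofList (PySem.Chars.join [c]
        (((PySem.Chars.splitOn cs [c]).take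
            (pvScanB (PySem.Chars.len cs - 16) (PySem.Chars.splitOn cs [c]).dropLast 0 0
              ((PySem.Chars.splitOn cs [c]).length - 1))).map
            (fun p => PySem.Chars.slice p none (some 1)) ++
          (PySem.Chars.splitOn cs [c]).drop
            (pvScanB (PySem.Chars.len cs - 16) (PySem.Chars.splitOn cs [c]).dropLast 0 0
              ((PySem.Chars.splitOn cs [c]).length - 1)))) := by
  rw [pvSplitOn_eq, pvSlice_eq_abbrev]
  have hne : pvSplit c cs ≠ [] := pvSplit_ne_nil c cs
  have h2 : 2 ≤ (pvSplit c cs).length := pvSplit_len_ge_two c cs hmem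
  rw [if_neg (by omega)]
  have hJ : pvJ (pvSplit c cs) = PySem.Chars.len cs := by
    rw [← pvLen_join c _ hne, pvJoin_pvSplit]
  have := pvMain c (PySem.Chars.len cs - 16) (pvSplit c cs) [] (by exact hne)
      (by simp [hJ])
  simp only [List.map_nil, List.nil_append, List.length_nil, pvSave, List.sum_nil] at this
  rw [this]

-- ===== VERDICT (by name: the statement is the Claim_ definition above) =====
theorem shorten_repo_name_spec : Claim_equal_shorten_repo_name := by
  intro name _
  unfold Spec_shorten_repo_name shorten_repo_name shorten_repo_name_alt
  by_cases h16 : PySem.Chars.len name.toList ≤ 16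
  · simp only [if_pos h16]
  · rw [if_neg h16, if_neg h16]
    by_cases hd : PySem.Chars.isIn ['-'] name.toList = true
    · simp only [hd, if_true]
      exact pvBody name.toList '-' (pvMem_of_isIn _ _ hd)
    · by_cases hu : PySem.Chars.isIn ['_'] name.toList = true
      · simp only [hd, hu, if_true, Bool.false_eq_true, if_false]
        exact pvBody name.toList '_' (pvMem_of_isIn _ _ hu)
      · simp only [hd, hu, Bool.false_eq_true, if_false]
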